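-- pv_equiv track=rewrite | github.com/jessburkhart/Python005 | CrimeDataSolution.py | create_offense_by_zip
-- ===== SOURCE A (Python) =====
-- def create_offense_dict(lst):
--     my_dict = {}
--     for element in lst[1:]:
--         if element[1] in my_dict:
--             my_dict[element[1]] += 1
--         else:
--             my_dict[element[1]] = 1
--     return my_dict
--
-- def create_offense_by_zip(lst):
--     newdict = create_offense_dict(lst)
--     my_dict2 = {}
--     for k in newdict.keys():
--         my_dict = {}
--         for element in lst[1:]:
--             if element[1] == k:
--                 if element[2] in my_dict:
--                     my_dict[element[2]] += 1
--                 else: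
--                     my_dict[element[2]] = 1
--         my_dict2[k] = my_dict
--     return my_dict2
-- ===== SOURCE B (Python) =====
-- def create_offense_by_zip(lst):
--     result = {}
--     for row in lst[1:]:
--         inner = result.setdefault(row[1], {})
--         inner[row[2]] = inner.get(row[2], 0) + 1
--     return result
-- ===== Notes on version B (the rewrite author's own statement) =====
-- stated objective: alternative
-- what changed: Replaced A's two-phase scheme (build an offense counter, then rescan all rows once per distinct offense) by one pass that builds the nested dict directly with setdefault; measured speed-up did not reach the 1.5x bar on the generated inputs.
import Mathlib
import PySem

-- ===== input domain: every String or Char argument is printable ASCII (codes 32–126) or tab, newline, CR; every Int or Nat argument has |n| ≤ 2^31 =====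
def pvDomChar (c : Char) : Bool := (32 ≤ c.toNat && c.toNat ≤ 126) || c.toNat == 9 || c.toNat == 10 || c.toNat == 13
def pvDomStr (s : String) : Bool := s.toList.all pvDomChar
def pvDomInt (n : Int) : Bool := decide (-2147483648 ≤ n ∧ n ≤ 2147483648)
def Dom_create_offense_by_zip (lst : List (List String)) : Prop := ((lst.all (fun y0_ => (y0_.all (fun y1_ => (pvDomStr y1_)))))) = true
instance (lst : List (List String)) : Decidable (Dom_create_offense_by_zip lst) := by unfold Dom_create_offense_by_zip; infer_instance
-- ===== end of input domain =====

-- B replaces A's per-offense rescans by a single pass building the nested dict; equality of the RETURN value is what is proved.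

-- ===== PORT A =====
-- element[1] / element[2]; inside Pre_ every row of lst[1:] has length ≥ 3, where pyGetD is exact
def pvKey (e : List String) : String := PySem.List.pyGetD e 1 ""
def pvZip (e : List String) : String := PySem.List.pyGetD e 2 ""

def create_offense_dict (lst : List (List String)) : PySem.Dict String Int :=
  (PySem.List.slice lst (some 1) none).foldl
    (fun my_dict element =>
      if my_dict.contains (pvKey element) then
        my_dict.insert (pvKey element) (my_dict.getD (pvKey element) 0 + 1)
      else
        my_dict.insert (pvKey element) 1)
    PySem.Dict.empty

def create_offense_by_zip (lst : List (List String)) : List (String × List (String × Int)) :=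
  (((create_offense_dict lst).keys.foldl
      (fun my_dict2 k =>
        my_dict2.insert k
          ((PySem.List.slice lst (some 1) none).foldl
            (fun my_dict element =>
              if pvKey element == k then
                (if my_dict.contains (pvZip element) then
                  my_dict.insert (pvZip element) (my_dict.getD (pvZip element) 0 + 1)
                else
                  my_dict.insert (pvZip element) 1)
              else my_dict)
            PySem.Dict.empty))
      PySem.Dict.empty).items).map (fun p => (p.1, p.2.items))

-- ===== PORT B =====
def create_offense_by_zip_alt (lst : List (List String)) : List (String × List (String × Int)) :=
  -- inner = result.setdefault(row[1], {}); inner[row[2]] = inner.get(row[2], 0) + 1  is one modify of the nested dict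
  (((PySem.List.slice lst (some 1) none).foldl
      (fun result row =>
        result.modify (pvKey row) PySem.Dict.empty
          (fun inner => inner.modify (pvZip row) 0 (· + 1)))
      PySem.Dict.empty).items).map (fun p => (p.1, p.2.items))

-- ===== PRECONDITION & SPEC =====
-- Pre_ excludes exactly the inputs where A raises IndexError: a row of lst[1:] with fewer than 3 fields.
def Pre_create_offense_by_zip (lst : List (List String)) : Prop :=
  ∀ r ∈ lst.drop 1, 3 ≤ r.length
instance (lst : List (List String)) : Decidable (Pre_create_offense_by_zip lst) := by unfold Pre_create_offense_by_zip; infer_instance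
def pvWitness_create_offense_by_zip : List (List String) :=
  [["id", "offense", "zip"], ["1", "BURG", "64110"], ["2", "THEFT", "64110"], ["3", "BURG", "64111"]]

def Spec_create_offense_by_zip (lst : List (List String)) (out : List (String × List (String × Int))) : Prop := out = create_offense_by_zip_alt lst
instance (lst : List (List String)) (out : List (String × List (String × Int))) : Decidable (Spec_create_offense_by_zip lst out) := by unfold Spec_create_offense_by_zip; infer_instance

-- ===== CLAIM (what is proved, stated in full; the proofs are below) =====
def Claim_equal_create_offense_by_zip : Prop := ∀ (lst : List (List String)), Dom_create_offense_by_zip lst → Pre_create_offense_by_zip lst → Spec_create_offense_by_zip lst (create_offense_by_zip lst)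

-- ===== LEMMAS AND PROOFS =====

-- A's counter-loop body is insert-with-getD+1 in both branches
theorem pv_counter_branch (d : PySem.Dict String Int) (x : String) :
    (if d.contains x then d.insert x (d.getD x 0 + 1) else d.insert x 1)
      = d.insert x (d.getD x 0 + 1) := by
  by_cases h : d.contains x = true
  · simp [h]
  · simp only [Bool.not_eq_true] at h
    simp [PySem.Dict.getD_of_not_contains, h]

-- B's getD at k: the fold threads exactly the filtered rows through the inner update
theorem pv_getD_fold (rows : List (List String)) (d : PySem.Dict String (PySem.Dict String Int)) (k : String) :
    (rows.foldl
        (fun result row =>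
          result.modify (pvKey row) PySem.Dict.empty
            (fun inner => inner.modify (pvZip row) 0 (· + 1)))
        d).getD k PySem.Dict.empty
      = (rows.filter (fun r => pvKey r == k)).foldl
          (fun inner r => inner.modify (pvZip r) 0 (· + 1))
          (d.getD k PySem.Dict.empty) := by
  induction rows generalizing d with
  | nil => rfl
  | cons r t ih =>
    simp only [List.foldl_cons, List.filter_cons]
    by_cases hk : pvKey r = k
    · simp [hk, ih]
    · have hb : (pvKey r == k) = false := by simp [hk]
      have hne : ¬ (k = pvKey r) := fun h => hk h.symm
      simp [hb, ih, PySem.Dict.getD_modify, hne]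


-- the common normal form: distinct offenses in first-occurrence order, each with its zip counter
def pvCnt (rows : List (List String)) (k : String) : PySem.Dict String Int :=
  PySem.Dict.counter ((rows.filter (fun r => pvKey r == k)).map pvZip)

def pvOut (rows : List (List String)) : List (String × List (String × Int)) :=
  (PySem.Set.ofList (rows.map pvKey)).map (fun k => (k, (pvCnt rows k).items))

-- A's insert-branch counter loop over a projection is Counter of the mapped list
theorem pv_counter_proj (l : List (List String)) (f : List String → String) :
    l.foldl
      (fun d e =>
        if d.contains (f e) then d.insert (f e) (d.getD (f e) 0 + 1)
        else d.insert (f e) 1)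
      PySem.Dict.empty
    = PySem.Dict.counter (l.map f) := by
  have hc := PySem.List.foldl_congr_mem
      (l := l) (init := (PySem.Dict.empty : PySem.Dict String Int))
      (f := fun d e =>
        if d.contains (f e) then d.insert (f e) (d.getD (f e) 0 + 1)
        else d.insert (f e) 1)
      (g := fun d e => d.insert (f e) (d.getD (f e) 0 + 1))
      (fun d e _ => pv_counter_branch d (f e))
  rw [hc]
  rw [← List.foldl_map (f := f)
      (g := fun (d : PySem.Dict String Int) x => d.insert x (d.getD x 0 + 1))]
  exact PySem.Dict.foldl_insert_getD_add_one_eq_counter (l.map f)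

theorem pv_A_eq (lst : List (List String)) : create_offense_by_zip lst = pvOut lst.tail := by
  unfold create_offense_by_zip create_offense_dict pvOut
  rw [PySem.List.slice_from_one]
  rw [pv_counter_proj lst.tail pvKey, PySem.Dict.keys_counter]
  have hfresh : ∀ a ∈ PySem.Set.ofList (lst.tail.map pvKey),
      (PySem.Dict.empty : PySem.Dict String (PySem.Dict String Int)).contains a = false := by
    intro a _; simp
  have hnd : ((PySem.Set.ofList (lst.tail.map pvKey)).map (fun x => x)).Nodup := by
    simp only [List.map_id']
    exact PySem.Set.nodup_ofList (lst.tail.map pvKey)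
  rw [PySem.Dict.items_foldl_insert_fresh (d := PySem.Dict.empty)
      (l := PySem.Set.ofList (lst.tail.map pvKey)) (k := fun x => x)
      (v := fun k =>
        lst.tail.foldl
          (fun my_dict element =>
            if pvKey element == k then
              (if my_dict.contains (pvZip element) then
                my_dict.insert (pvZip element) (my_dict.getD (pvZip element) 0 + 1)
              else
                my_dict.insert (pvZip element) 1)
            else my_dict)
          PySem.Dict.empty)
      hfresh hnd]
  simp only [show (PySem.Dict.empty : PySem.Dict String (PySem.Dict String Int)).items = [] from rfl,
    List.nil_append, List.map_map]
  refine List.map_congr_left fun k _ => ?_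
  simp only [Function.comp]
  rw [PySem.List.foldl_if_eq_foldl_filter (p := fun r => pvKey r == k)]
  rw [pv_counter_proj (lst.tail.filter (fun r => pvKey r == k)) pvZip]
  rfl

theorem pv_B_eq (lst : List (List String)) : create_offense_by_zip_alt lst = pvOut lst.tail := by
  unfold create_offense_by_zip_alt pvOut
  rw [PySem.List.slice_from_one]
  have hnd : (lst.tail.foldl
        (fun result row =>
          result.modify (pvKey row) PySem.Dict.empty
            (fun inner => inner.modify (pvZip row) 0 (· + 1)))
        (PySem.Dict.empty : PySem.Dict String (PySem.Dict String Int))).keys.Nodup :=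
    PySem.Dict.nodup_keys_foldl_modify_key lst.tail pvKey PySem.Dict.empty
      (fun _ r => fun inner => inner.modify (pvZip r) 0 (· + 1)) PySem.Dict.empty
      (by simp)
  rw [PySem.Dict.items_eq_map_keys _ hnd PySem.Dict.empty]
  rw [PySem.Dict.keys_foldl_modify_key]
  have hkeys : PySem.Set.update
      (PySem.Dict.empty : PySem.Dict String (PySem.Dict String Int)).keys (lst.tail.map pvKey)
      = PySem.Set.ofList (lst.tail.map pvKey) := by
    simp [PySem.Set.update, PySem.Set.ofList_eq_foldl]
  rw [hkeys, List.map_map]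
  refine List.map_congr_left fun k _ => ?_
  simp only [Function.comp]
  rw [pv_getD_fold]
  simp only [PySem.Dict.getD_empty]
  rw [← List.foldl_map (f := pvZip)
      (g := fun (d : PySem.Dict String Int) x => d.modify x 0 (· + 1))]
  rw [← PySem.Dict.counter_eq_foldl]
  rfl

-- ===== VERDICT (by name: the statement is the Claim_ definition above) =====
theorem create_offense_by_zip_spec : Claim_equal_create_offense_by_zip := by
  intro lst _ _
  unfold Spec_create_offense_by_zip
  rw [pv_A_eq, pv_B_eq]
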